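-- pv_equiv track=rewrite | github.com/MariosGkMeng/Straightforward-Obsidian2Latex | src/list_of_separate_lines.py | get_list_of_separate_string_lines
-- ===== SOURCE A (Python) =====
-- def get_list_of_separate_string_lines(S):
--
--     result_list = []
--
--     for string in S:
--         # Check if the string contains line breaks
--         if "\n" in string:
--             # Split the string into separate lines
--             lines = string.split("\n")
--             # Extend the result list with the separated lines
--             result_list.extend(lines)
--         else:
--             # If no line break, add the string as it is
--             result_list.append(string)
--
--     return result_list
-- ===== SOURCE B (Python) =====
-- def get_list_of_separate_string_lines(S):
--     if not S:
--         return []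
--     return "\n".join(S).split("\n")
-- ===== Notes on version B (the rewrite author's own statement) =====
-- stated objective: simpler
-- what changed: Replaced the per-element loop with its contains-check and extend/append branches by a single join-then-split: concatenate all strings with newlines and split the combined string once (with an empty-list guard).
import Mathlib
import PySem

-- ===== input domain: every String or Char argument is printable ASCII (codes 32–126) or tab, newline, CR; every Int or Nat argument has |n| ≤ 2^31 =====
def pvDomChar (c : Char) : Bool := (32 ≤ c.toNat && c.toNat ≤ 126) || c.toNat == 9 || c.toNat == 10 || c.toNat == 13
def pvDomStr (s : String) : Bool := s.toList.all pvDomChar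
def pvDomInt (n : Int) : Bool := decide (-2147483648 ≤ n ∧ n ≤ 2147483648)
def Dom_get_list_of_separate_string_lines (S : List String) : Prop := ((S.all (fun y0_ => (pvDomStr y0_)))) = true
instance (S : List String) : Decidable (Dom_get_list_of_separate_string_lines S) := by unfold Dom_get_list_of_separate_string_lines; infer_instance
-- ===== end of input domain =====

-- B replaces A's per-element loop with a single join-then-split pass; objective: simpler.

-- ===== PORT A =====
-- s.split("\n") (sep nonempty, so exact): PySem.Chars.splitOn on the code points
def pySplitNewline (s : String) : List String :=
  (PySem.Chars.splitOn s.toList ['\n']).map String.ofList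

def get_list_of_separate_string_lines (S : List String) : List String :=
  S.foldl (fun result_list string =>
    if PySem.Str.isIn "\n" string then
      result_list ++ pySplitNewline string
    else
      result_list ++ [string]) []

-- ===== PORT B =====
def get_list_of_separate_string_lines_alt (S : List String) : List String :=
  if S = [] then [] else pySplitNewline (PySem.Str.join "\n" S)

-- ===== PRECONDITION & SPEC =====
def Spec_get_list_of_separate_string_lines (S : List String) (out : List String) : Prop := out = get_list_of_separate_string_lines_alt S
instance (S : List String) (out : List String) : Decidable (Spec_get_list_of_separate_string_lines S out) := by unfold Spec_get_list_of_separate_string_lines; infer_instance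

-- ===== CLAIM (what is proved, stated in full; the proofs are below) =====
def Claim_equal_get_list_of_separate_string_lines : Prop := ∀ (S : List String), Dom_get_list_of_separate_string_lines S → Spec_get_list_of_separate_string_lines S (get_list_of_separate_string_lines S)

-- ===== LEMMAS AND PROOFS =====

-- simple structural recursion computing split on a single char
def splitNL : List Char → List (List Char)
  | [] => [[]]
  | c :: xs => if c = '\n' then [] :: splitNL xs else (splitNL xs).modifyHead (c :: ·)

theorem splitNL_ne_nil (l : List Char) : splitNL l ≠ [] := by
  induction l with
  | nil => simp [splitNL]
  | cons c xs ih =>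
    simp only [splitNL]
    split_ifs
    · simp
    · cases h : splitNL xs with
      | nil => exact absurd h ih
      | cons hd tl => simp [List.modifyHead]

theorem splitOn_go_eq (fuel : Nat) :
    ∀ (l cur : List Char) (accl : List (List Char)), l.length ≤ fuel →
      PySem.Chars.splitOn.go ['\n'] fuel l cur accl =
        accl.reverse ++ (splitNL l).modifyHead (cur.reverse ++ ·) := by
  induction fuel with
  | zero =>
    intro l cur accl h
    have hl : l = [] := List.length_eq_zero_iff.mp (Nat.le_zero.mp h)
    subst hl
    simp [PySem.Chars.splitOn.go, splitNL, List.modifyHead]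
  | succ n ih =>
    intro l cur accl h
    cases l with
    | nil => simp [PySem.Chars.splitOn.go, splitNL, List.modifyHead]
    | cons c rest =>
      have hrest : rest.length ≤ n := by simpa using h
      by_cases hc : c = '\n'
      · subst hc
        have step : PySem.Chars.splitOn.go ['\n'] (n+1) ('\n'::rest) cur accl
            = PySem.Chars.splitOn.go ['\n'] n rest [] (cur.reverse :: accl) := by
          simp [PySem.Chars.splitOn.go, List.isPrefixOf]
        rw [step, ih rest [] (cur.reverse :: accl) hrest]
        cases hs : splitNL rest with
        | nil => exact absurd hs (splitNL_ne_nil rest)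
        | cons hd tl => simp [splitNL, List.modifyHead, hs]
      · have step : PySem.Chars.splitOn.go ['\n'] (n+1) (c::rest) cur accl
            = PySem.Chars.splitOn.go ['\n'] n rest (c::cur) accl := by
          simp [PySem.Chars.splitOn.go, List.isPrefixOf, Ne.symm hc]
        rw [step, ih rest (c::cur) accl hrest]
        cases hs : splitNL rest with
        | nil => exact absurd hs (splitNL_ne_nil rest)
        | cons hd tl => simp [splitNL, hc, hs, List.modifyHead]

theorem splitOn_eq_splitNL (l : List Char) :
    PySem.Chars.splitOn l ['\n'] = splitNL l := by
  have h := splitOn_go_eq (l.length + 1) l [] [] (Nat.le_succ _)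
  rw [PySem.Chars.splitOn, h]
  cases hs : splitNL l with
  | nil => exact absurd hs (splitNL_ne_nil l)
  | cons hd tl => simp [List.modifyHead]

theorem splitNL_append (a b : List Char) :
    splitNL (a ++ '\n' :: b) = splitNL a ++ splitNL b := by
  induction a with
  | nil => simp [splitNL]
  | cons x xs ih =>
    simp only [List.cons_append, splitNL, ih]
    split_ifs
    · rfl
    · cases h : splitNL xs with
      | nil => exact absurd h (splitNL_ne_nil xs)
      | cons hd tl => simp [List.modifyHead]

theorem splitNL_of_not_mem (l : List Char) (h : '\n' ∉ l) : splitNL l = [l] := by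
  induction l with
  | nil => rfl
  | cons x xs ih =>
    simp only [List.mem_cons, not_or] at h
    simp [splitNL, Ne.symm h.1, ih h.2, List.modifyHead]

theorem splitNL_intercalate (L : List (List Char)) (h : L ≠ []) :
    splitNL (List.intercalate ['\n'] L) = L.flatMap splitNL := by
  induction L with
  | nil => exact absurd rfl h
  | cons x t ih =>
    cases t with
    | nil => simp [List.intercalate]
    | cons y u =>
      have hstep : List.intercalate ['\n'] (x :: y :: u)
          = x ++ '\n' :: List.intercalate ['\n'] (y :: u) := by
        simp [List.intercalate, List.intersperse]
      rw [hstep, splitNL_append, ih (by simp)]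
      simp

theorem singleton_infix_iff (c : Char) (l : List Char) : [c] <:+: l ↔ c ∈ l := by
  constructor
  · rintro ⟨p, q, rfl⟩; simp
  · intro hm
    obtain ⟨p, q, rfl⟩ := List.append_of_mem hm
    exact ⟨p, q, by simp⟩

theorem pySplitNewline_of_not_contains (s : String) (h : PySem.Str.isIn "\n" s = false) :
    pySplitNewline s = [s] := by
  have hnm : '\n' ∉ s.toList := by
    intro hm
    have hi : PySem.Chars.isIn ['\n'] s.toList = true :=
      (PySem.Chars.isIn_iff_infix _ _).mpr ((singleton_infix_iff '\n' s.toList).mpr hm)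
    simp only [PySem.Str.isIn_eq] at h
    rw [show ("\n" : String).toList = ['\n'] from rfl, hi] at h
    simp at h
  simp [pySplitNewline, splitOn_eq_splitNL, splitNL_of_not_mem s.toList hnm]

theorem portA_eq_flatMap (S : List String) :
    get_list_of_separate_string_lines S = S.flatMap pySplitNewline := by
  rw [get_list_of_separate_string_lines]
  have hfun : (fun (result_list : List String) (string : String) =>
      if PySem.Str.isIn "\n" string then result_list ++ pySplitNewline string
      else result_list ++ [string])
      = fun result_list string => result_list ++ pySplitNewline string := by
    funext acc s
    cases hcb : PySem.Str.isIn "\n" s with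
    | true => simp
    | false => simp [pySplitNewline_of_not_contains s hcb]
  rw [hfun, PySem.List.foldl_append_eq_flatMap]
  simp

-- ===== VERDICT (by name: the statement is the Claim_ definition above) =====
theorem get_list_of_separate_string_lines_spec : Claim_equal_get_list_of_separate_string_lines := by
  intro S _
  unfold Spec_get_list_of_separate_string_lines
  rw [portA_eq_flatMap, get_list_of_separate_string_lines_alt]
  by_cases hS : S = []
  · simp [hS]
  · rw [if_neg hS]
    have hL : S.map String.toList ≠ [] := by simpa using hS
    have hjoin : (PySem.Str.join "\n" S).toList
        = List.intercalate ['\n'] (S.map String.toList) := by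
      simp [PySem.Str.join, PySem.Chars.join]
    rw [pySplitNewline, hjoin, splitOn_eq_splitNL, splitNL_intercalate _ hL]
    have hps : pySplitNewline = fun s => List.map String.ofList (splitNL s.toList) := by
      funext s; rw [pySplitNewline, splitOn_eq_splitNL]
    simp [hps, List.flatMap_map, List.map_flatMap]
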